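-- pv_equiv track=rewrite | github.com/seeligto/hexo_rl | tests/test_opening_classifier.py | _rotate_moves
-- ===== SOURCE A (Python) =====
-- def _rotate_60(q: int, r: int) -> tuple[int, int]:
--     """Rotate (q, r) by +60 degrees around origin."""
--     # In cube coords: (x,y,z) -> (-z,-x,-y)
--     # Axial: x=q, z=-(q+r) => new_q = q+r, new_r = -q
--     return (q + r, -q)
--
-- def _rotate_moves(moves: list[tuple[int, int]], n: int) -> list[tuple[int, int]]:
--     """Rotate all moves n times by 60 degrees around moves[0]."""
--     if not moves:
--         return moves
--     cq, cr = moves[0]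
--     result = []
--     for q, r in moves:
--         rq, rr = q - cq, r - cr
--         for _ in range(n % 6):
--             rq, rr = _rotate_60(rq, rr)
--         result.append((rq + cq, rr + cr))
--     return result
-- ===== SOURCE B (Python) =====
-- _ROT = [(1, 0, 0, 1), (1, 1, -1, 0), (0, 1, -1, -1),
--         (-1, 0, 0, -1), (-1, -1, 1, 0), (0, -1, 1, 1)]
--
-- def _rotate_moves(moves: list[tuple[int, int]], n: int) -> list[tuple[int, int]]:
--     """Rotate all moves n times by 60 degrees around moves[0] (closed-form map)."""
--     if not moves:
--         return moves
--     a, b, c, d = _ROT[n % 6]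
--     cq, cr = moves[0]
--     return [(cq + a * (q - cq) + b * (r - cr), cr + c * (q - cq) + d * (r - cr))
--             for q, r in moves]
-- ===== Notes on version B (the rewrite author's own statement) =====
-- stated objective: simpler
-- what changed: Replaces the inner repeat-k-times rotation loop with a precomputed table of the six closed-form 60-degree linear maps selected by n % 6 and applied in one pass.
import Mathlib
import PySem

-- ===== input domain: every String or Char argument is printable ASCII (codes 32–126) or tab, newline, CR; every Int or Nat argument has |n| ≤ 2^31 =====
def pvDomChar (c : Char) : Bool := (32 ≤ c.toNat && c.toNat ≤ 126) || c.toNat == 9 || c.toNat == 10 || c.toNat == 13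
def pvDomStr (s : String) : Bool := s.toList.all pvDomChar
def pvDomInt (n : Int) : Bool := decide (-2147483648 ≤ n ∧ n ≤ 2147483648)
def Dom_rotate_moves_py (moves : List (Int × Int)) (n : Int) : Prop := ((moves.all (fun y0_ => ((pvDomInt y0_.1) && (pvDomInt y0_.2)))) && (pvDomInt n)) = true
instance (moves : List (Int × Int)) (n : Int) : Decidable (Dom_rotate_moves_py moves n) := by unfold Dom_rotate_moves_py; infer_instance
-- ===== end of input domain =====

-- B replaces the per-move repeat-(n%6) rotation loop with a table of the six closed-form linear maps (simpler, one pass).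


-- ===== PORT A =====
-- _rotate_60
def rotate60 (p : Int × Int) : Int × Int := (p.1 + p.2, -p.1)

def rotate_moves_py (moves : List (Int × Int)) (n : Int) : List (Int × Int) :=
  match moves with
  | [] => moves
  | (cq, cr) :: _ =>
    -- for q, r in moves: ... result.append(...)
    moves.foldl (fun result m =>
      let p := rotate60^[(PySem.Int.mod n 6).toNat] (m.1 - cq, m.2 - cr)
      result ++ [(p.1 + cq, p.2 + cr)]) []

-- ===== PORT B =====
def pvRotTable : List (Int × Int × Int × Int) :=
  [(1, 0, 0, 1), (1, 1, -1, 0), (0, 1, -1, -1),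
   (-1, 0, 0, -1), (-1, -1, 1, 0), (0, -1, 1, 1)]

def rotate_moves_py_alt (moves : List (Int × Int)) (n : Int) : List (Int × Int) :=
  match moves with
  | [] => moves
  | (cq, cr) :: _ =>
    let t := pvRotTable.getD (PySem.Int.mod n 6).toNat (1, 0, 0, 1)
    let a := t.1; let b := t.2.1; let c := t.2.2.1; let d := t.2.2.2
    moves.map (fun m =>
      (cq + a * (m.1 - cq) + b * (m.2 - cr), cr + c * (m.1 - cq) + d * (m.2 - cr)))

-- ===== PRECONDITION & SPEC =====
def Spec_rotate_moves_py (moves : List (Int × Int)) (n : Int) (out : List (Int × Int)) : Prop := out = rotate_moves_py_alt moves n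
instance (moves : List (Int × Int)) (n : Int) (out : List (Int × Int)) : Decidable (Spec_rotate_moves_py moves n out) := by unfold Spec_rotate_moves_py; infer_instance

-- ===== CLAIM (what is proved, stated in full; the proofs are below) =====
def Claim_equal_rotate_moves_py : Prop := ∀ (moves : List (Int × Int)) (n : Int), Dom_rotate_moves_py moves n → Spec_rotate_moves_py moves n (rotate_moves_py moves n)

-- ===== LEMMAS AND PROOFS =====

theorem pv_foldl_append (f : (Int × Int) → (Int × Int)) (l : List (Int × Int)) (acc : List (Int × Int)) :
    l.foldl (fun result m => result ++ [f m]) acc = acc ++ l.map f := by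
  induction l generalizing acc with
  | nil => simp
  | cons x xs ih => simp [List.foldl, ih, List.append_assoc]

theorem pv_mod6_lt (n : Int) : (PySem.Int.mod n 6).toNat < 6 := by
  have h1 : 0 ≤ Int.fmod n 6 := Int.fmod_nonneg_of_pos n (by norm_num)
  have h2 : Int.fmod n 6 < 6 := Int.fmod_lt_of_pos n (by norm_num)
  simp only [PySem.Int.mod]
  omega

theorem pv_iter_eq (k : Nat) (hk : k < 6) (x y : Int) :
    rotate60^[k] (x, y) =
      (let t := pvRotTable.getD k (1, 0, 0, 1);
        (t.1 * x + t.2.1 * y, t.2.2.1 * x + t.2.2.2 * y)) := by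
  interval_cases k <;>
    simp [rotate60, pvRotTable, Function.iterate_succ_apply', Function.iterate_zero] <;> ring_nf

theorem rotate_moves_eq (moves : List (Int × Int)) (n : Int) :
    rotate_moves_py moves n = rotate_moves_py_alt moves n := by
  cases moves with
  | nil => rfl
  | cons hd tl =>
    obtain ⟨cq, cr⟩ := hd
    simp only [rotate_moves_py, rotate_moves_py_alt]
    rw [pv_foldl_append]
    simp only [List.nil_append]
    apply List.map_congr_left
    intro m _
    rw [pv_iter_eq _ (pv_mod6_lt n)]
    simp only []
    apply Prod.ext <;> simp <;> ring

-- ===== VERDICT (by name: the statement is the Claim_ definition above) =====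
theorem rotate_moves_py_spec : Claim_equal_rotate_moves_py := by
  intro moves n _
  unfold Spec_rotate_moves_py
  exact rotate_moves_eq moves n
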